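-- pv_equiv track=rewrite | github.com/maxmurtazin/Ant-RH | core/artin_aco.py | count_motif_occurrences
-- ===== SOURCE A (Python) =====
-- from typing import Any, Dict, Iterable, List, Optional, Tuple
--
-- SEED_MOTIFS = [
--     [1, -1, 1, -1],
--     [-1, 1, -1, 1],
--     [-2, 2, 1, -1],
--     [2, -2, 1, -1],
--     [3, -3, -1, 1],
--     [-4, 1, -1, 1],
--     [4, -1, 1, -1],
-- ]
--
-- def count_motif_occurrences(word: List[int], motifs: Optional[List[List[int]]] = None) -> int:
--     """Count contiguous matches of any seed motif as a sublist of ``word`` (overlaps allowed)."""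
--     if motifs is None:
--         motifs = SEED_MOTIFS
--     w = [int(x) for x in word]
--     total = 0
--     for m in motifs:
--         if not m:
--             continue
--         k = len(m)
--         n = len(w)
--         if n < k:
--             continue
--         for i in range(n - k + 1):
--             if w[i : i + k] == m:
--                 total += 1
--     return int(total)
-- ===== SOURCE B (Python) =====
-- from typing import List, Optional
--
-- SEED_MOTIFS = [
--     [1, -1, 1, -1],
--     [-1, 1, -1, 1],
--     [-2, 2, 1, -1],
--     [2, -2, 1, -1],
--     [3, -3, -1, 1],
--     [-4, 1, -1, 1],
--     [4, -1, 1, -1],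
-- ]
--
-- def count_motif_occurrences(word: List[int], motifs: Optional[List[List[int]]] = None) -> int:
--     """Count contiguous matches of any seed motif as a sublist of ``word`` (overlaps allowed)."""
--     if motifs is None:
--         motifs = SEED_MOTIFS
--     w = [int(x) for x in word]
--     n = len(w)
--     index = {}  # motif length k -> counter of all k-windows of w (built once per distinct length)
--     total = 0
--     for m in motifs:
--         k = len(m)
--         if k == 0 or k > n:
--             continue
--         if k not in index:
--             cnt = {}
--             for i in range(n - k + 1):
--                 key = tuple(w[i:i + k])
--                 cnt[key] = cnt.get(key, 0) + 1
--             index[k] = cnt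
--         total += index[k].get(tuple(m), 0)
--     return total
-- ===== Notes on version B (the rewrite author's own statement) =====
-- stated objective: faster
-- what changed: Instead of rescanning the word with an inner index loop for every motif, B builds, once per distinct motif length k, a hash-map counter of all k-windows of the word, and answers each motif by a single dictionary lookup.
import Mathlib
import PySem

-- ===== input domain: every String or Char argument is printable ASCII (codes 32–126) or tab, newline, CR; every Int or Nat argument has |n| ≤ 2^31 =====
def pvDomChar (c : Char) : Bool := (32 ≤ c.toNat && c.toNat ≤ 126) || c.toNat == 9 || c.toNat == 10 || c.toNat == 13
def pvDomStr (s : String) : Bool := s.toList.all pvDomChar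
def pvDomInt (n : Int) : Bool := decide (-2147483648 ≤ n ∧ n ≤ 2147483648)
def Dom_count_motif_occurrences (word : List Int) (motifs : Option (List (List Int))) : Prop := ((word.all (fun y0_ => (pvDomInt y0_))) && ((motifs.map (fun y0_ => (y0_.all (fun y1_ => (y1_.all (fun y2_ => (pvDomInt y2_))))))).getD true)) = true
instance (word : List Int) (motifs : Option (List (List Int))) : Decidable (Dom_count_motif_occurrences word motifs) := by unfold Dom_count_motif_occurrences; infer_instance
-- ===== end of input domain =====

-- B replaces A's per-motif rescans of `word` by a window-counter dictionary built once per
-- distinct motif length and then looked up per motif (objective: faster on motif lists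
-- sharing lengths; exact same totals).


-- ===== PORT A =====
def SEED_MOTIFS : List (List Int) :=
  [[1, -1, 1, -1], [-1, 1, -1, 1], [-2, 2, 1, -1], [2, -2, 1, -1],
   [3, -3, -1, 1], [-4, 1, -1, 1], [4, -1, 1, -1]]

-- literal port of A: outer loop over motifs, inner index loop comparing the slice w[i:i+k]
def count_motif_occurrences (word : List Int) (motifs : Option (List (List Int))) : Int :=
  let motifs := motifs.getD SEED_MOTIFS
  let w := word.map (fun x => x)   -- int(x) is the identity on ints
  motifs.foldl (fun total m =>
    if m = [] then total
    else
      let k : Int := m.length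
      let n : Int := w.length
      if n < k then total
      else
        (PySem.List.pyRange 0 (n - k + 1) 1).foldl
          (fun t i => if PySem.List.slice w (some i) (some (i + k)) = m then t + 1 else t)
          total) 0

-- ===== PORT B =====
-- literal port of B (Source B): lazy dict `index` from motif length to a counter of the
-- k-windows of w, built once per distinct length; then one lookup per motif
def count_motif_occurrences_alt (word : List Int) (motifs : Option (List (List Int))) : Int :=
  let motifs := motifs.getD SEED_MOTIFS
  let w := word.map (fun x => x)   -- int(x) is the identity on ints
  let n : Int := w.length
  (motifs.foldl (fun (st : PySem.Dict Int (PySem.Dict (List Int) Int) × Int) m =>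
      let k : Int := m.length
      if k = 0 ∨ n < k then st
      else
        let index :=
          if st.1.contains k then st.1
          else
            st.1.insert k
              ((PySem.List.pyRange 0 (n - k + 1) 1).foldl
                (fun cnt i =>
                  let key := PySem.List.slice w (some i) (some (i + k))
                  cnt.insert key (cnt.getD key 0 + 1))
                PySem.Dict.empty)
        (index, st.2 + (index.getD k PySem.Dict.empty).getD m 0))
    (PySem.Dict.empty, 0)).2

-- ===== PRECONDITION & SPEC =====
def Spec_count_motif_occurrences (word : List Int) (motifs : Option (List (List Int))) (out : Int) : Prop := out = count_motif_occurrences_alt word motifs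
instance (word : List Int) (motifs : Option (List (List Int))) (out : Int) : Decidable (Spec_count_motif_occurrences word motifs out) := by unfold Spec_count_motif_occurrences; infer_instance

-- ===== CLAIM (what is proved, stated in full; the proofs are below) =====
def Claim_equal_count_motif_occurrences : Prop := ∀ (word : List Int) (motifs : Option (List (List Int))), Dom_count_motif_occurrences word motifs → Spec_count_motif_occurrences word motifs (count_motif_occurrences word motifs)

-- ===== LEMMAS AND PROOFS =====

-- the list of k-windows of w (the values both programs compare motifs of length k against)
def pvWindows (w : List Int) (k : Int) : List (List Int) :=
  (PySem.List.pyRange 0 ((w.length : Int) - k + 1) 1).map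
    (fun i => PySem.List.slice w (some i) (some (i + k)))

-- A's inner loop counts the occurrences of m among the k-windows
lemma aInner_eq_count (w m : List Int) (t : Int) (k : Int) :
    (PySem.List.pyRange 0 ((w.length : Int) - k + 1) 1).foldl
      (fun t i => if PySem.List.slice w (some i) (some (i + k)) = m then t + 1 else t) t
    = t + ((pvWindows w k).count m : Int) := by
  rw [PySem.List.foldl_ite_add_one]
  congr 1
  unfold pvWindows
  rw [List.count_eq_countP, List.countP_map]
  congr 1
  apply List.countP_congr
  intro i _
  simp only [Function.comp_apply, decide_eq_true_eq, beq_iff_eq]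

-- B's counter for length k assigns every window list its multiplicity
lemma bCounter_getD (w m : List Int) (k : Int) :
    ((PySem.List.pyRange 0 ((w.length : Int) - k + 1) 1).foldl
      (fun (cnt : PySem.Dict (List Int) Int) i =>
        let key := PySem.List.slice w (some i) (some (i + k))
        cnt.insert key (cnt.getD key 0 + 1))
      PySem.Dict.empty).getD m 0 = ((pvWindows w k).count m : Int) := by
  have h := PySem.Dict.getD_foldl_insert_add_one (l := pvWindows w k)
      (d := (PySem.Dict.empty : PySem.Dict (List Int) Int)) (v := m)
  unfold pvWindows at *
  rw [List.foldl_map] at h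
  simpa using h

-- the fold equality, by induction over the motif list with the index-dictionary invariant
lemma fold_eq (w : List Int) (ms : List (List Int))
    (idx : PySem.Dict Int (PySem.Dict (List Int) Int)) (t : Int)
    (hinv : ∀ k d, idx.get? k = some d → ∀ m, d.getD m 0 = ((pvWindows w k).count m : Int)) :
    (ms.foldl (fun (st : PySem.Dict Int (PySem.Dict (List Int) Int) × Int) m =>
      let k : Int := m.length
      if k = 0 ∨ (w.length : Int) < k then st
      else
        let index :=
          if st.1.contains k then st.1
          else
            st.1.insert k
              ((PySem.List.pyRange 0 ((w.length : Int) - k + 1) 1).foldl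
                (fun cnt i =>
                  let key := PySem.List.slice w (some i) (some (i + k))
                  cnt.insert key (cnt.getD key 0 + 1))
                PySem.Dict.empty)
        (index, st.2 + (index.getD k PySem.Dict.empty).getD m 0)) (idx, t)).2
    = ms.foldl (fun total m =>
        if m = [] then total
        else
          if (w.length : Int) < (m.length : Int) then total
          else
            (PySem.List.pyRange 0 ((w.length : Int) - (m.length : Int) + 1) 1).foldl
              (fun t i => if PySem.List.slice w (some i) (some (i + (m.length : Int))) = m then t + 1 else t)
              total) t := by
  induction ms generalizing idx t with
  | nil => rfl
  | cons m rest ih =>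
    simp only [List.foldl_cons]
    by_cases h0 : m = []
    · subst h0
      simp only [List.length_nil, Nat.cast_zero]
      exact ih idx t hinv
    · have hk0 : (m.length : Int) ≠ 0 := by
        simpa [List.length_eq_zero_iff] using h0
      by_cases hn : (w.length : Int) < (m.length : Int)
      · simp only [if_pos (Or.inr hn), if_neg h0, if_pos hn]
        exact ih idx t hinv
      · simp only [if_neg (by exact not_or.mpr ⟨hk0, hn⟩ : ¬((m.length : Int) = 0 ∨ (w.length : Int) < (m.length : Int))),
          if_neg h0, if_neg hn]
        rw [aInner_eq_count w m t (m.length : Int)]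
        by_cases hc : idx.contains ((m.length : Int))
        · simp only [if_pos hc]
          obtain ⟨d, hd⟩ : ∃ d, idx.get? ((m.length : Int)) = some d := by
            rw [PySem.Dict.contains_eq_isSome_get?] at hc
            exact Option.isSome_iff_exists.mp hc
          rw [PySem.Dict.getD_of_get?_eq_some _ _ hd, hinv _ _ hd m]
          exact ih idx _ hinv
        · simp only [if_neg hc]
          rw [PySem.Dict.getD_insert_self, bCounter_getD w m]
          refine ih _ _ ?_
          intro k' d' hd' m'
          rw [PySem.Dict.get?_insert] at hd'
          by_cases hkk : k' = (m.length : Int)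
          · rw [if_pos hkk] at hd'
            cases hd'
            rw [hkk, bCounter_getD w m']
          · rw [if_neg hkk] at hd'
            exact hinv _ _ hd' m'

-- ===== VERDICT (by name: the statement is the Claim_ definition above) =====
theorem count_motif_occurrences_spec : Claim_equal_count_motif_occurrences := by
  intro word motifs _
  exact (fold_eq (word.map (fun x => x)) (motifs.getD SEED_MOTIFS) PySem.Dict.empty 0
    (by intro k d hd; simp [PySem.Dict.get?_empty] at hd)).symm
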